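-- pv_equiv track=rewrite | github.com/braiv/braivtalk | app/braivtalk/models/lr_asd/detector.py | _fill_short_gaps
-- ===== SOURCE A (Python) =====
-- from typing import List, Tuple
--
-- def _fill_short_gaps(mask: List[bool], max_gap: int) -> List[bool]:
--     """Fill silent gaps shorter than *max_gap* frames between speaking segments."""
--     result = list(mask)
--     n = len(result)
--     i = 0
--     while i < n:
--         if not result[i]:
--             # Start of a silent gap
--             gap_start = i
--             while i < n and not result[i]:
--                 i += 1
--             gap_len = i - gap_start
--             # If this gap is short AND bordered by speaking on both sides, fill it
--             if gap_len <= max_gap and gap_start > 0 and i < n: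
--                 for j in range(gap_start, i):
--                     result[j] = True
--         else:
--             i += 1
--     return result
-- ===== SOURCE B (Python) =====
-- from typing import List
--
-- def _fill_short_gaps(mask: List[bool], max_gap: int) -> List[bool]:
--     """Pointwise classification: a silent frame becomes speaking iff the nearest
--     speaking frames on both sides exist and enclose a gap of at most max_gap frames."""
--     n = len(mask)
--     # next_true[k]: index of the nearest speaking frame at or after k (n if none)
--     next_true = [n] * n
--     nxt = n
--     for k in range(n - 1, -1, -1):
--         if mask[k]:
--             nxt = k
--         next_true[k] = nxt
--     out = []
--     prev = -1  # nearest speaking frame before the current one (-1 if none)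
--     for k in range(n):
--         if mask[k]:
--             prev = k
--             out.append(True)
--         else:
--             b = next_true[k]
--             out.append(prev >= 0 and b < n and b - prev - 1 <= max_gap)
--     return out
-- ===== Notes on version B (the rewrite author's own statement) =====
-- stated objective: alternative
-- what changed: Replaces A's in-place run-scanning while loop (find each silent run, then conditionally overwrite it) by a two-pass pointwise classification: a reverse pass records the nearest speaking frame at or after each index, then a single forward pass with a running previous-speaking index decides each output frame independently.
import Mathlib
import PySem

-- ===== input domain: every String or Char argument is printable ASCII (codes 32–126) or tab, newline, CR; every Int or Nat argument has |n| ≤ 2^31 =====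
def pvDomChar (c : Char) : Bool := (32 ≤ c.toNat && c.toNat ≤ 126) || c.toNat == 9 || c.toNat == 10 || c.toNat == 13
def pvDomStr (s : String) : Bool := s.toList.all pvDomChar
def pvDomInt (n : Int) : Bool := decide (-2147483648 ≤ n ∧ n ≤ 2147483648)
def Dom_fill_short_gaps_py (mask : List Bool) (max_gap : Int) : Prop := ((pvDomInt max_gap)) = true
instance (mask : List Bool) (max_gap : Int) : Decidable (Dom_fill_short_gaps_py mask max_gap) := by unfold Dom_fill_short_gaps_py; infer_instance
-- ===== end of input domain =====

-- B replaces A's in-place run-scanning while loop by a two-pass pointwise classification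
-- (nearest-next-speaking array + running previous-speaking index); objective: alternative.

-- ===== PORT A =====
-- inner `while i < n and not result[i]: i += 1` of A
def aGapEnd (result : List Bool) (n i : Nat) : Nat :=
  if _h : i < n ∧ result.getD i false = false then aGapEnd result n (i + 1) else i
termination_by n - i
decreasing_by omega

-- `for j in range(gap_start, i): result[j] = True` of A
def aFill (result : List Bool) (s j : Nat) : List Bool :=
  (List.range' s (j - s)).foldl (fun r k => r.set k true) result

-- A's outer while loop; i increases by at least 1 per iteration, so fuel = n suffices
def aLoop (max_gap : Int) (result : List Bool) (n i : Nat) : Nat → List Bool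
  | 0 => result
  | fuel + 1 =>
    if i < n then
      if result.getD i false = false then
        let j := aGapEnd result n i
        let result' :=
          if ((j : Int) - (i : Int) ≤ max_gap ∧ 0 < i ∧ j < n) then aFill result i j else result
        aLoop max_gap result' n j fuel
      else aLoop max_gap result n (i + 1) fuel
    else result

def fill_short_gaps_py (mask : List Bool) (max_gap : Int) : List Bool :=
  aLoop max_gap mask mask.length 0 mask.length

-- ===== PORT B =====
-- B's reverse pass building next_true
def bNextPass (mask : List Bool) (n : Nat) : List Nat :=
  ((List.range n).reverse.foldl
    (fun (acc : List Nat × Nat) k =>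
      let nxt := if mask.getD k false then k else acc.2
      (acc.1.set k nxt, nxt))
    (List.replicate n n, n)).1

def fill_short_gaps_py_alt (mask : List Bool) (max_gap : Int) : List Bool :=
  let n := mask.length
  let nt := bNextPass mask n
  ((List.range n).foldl
    (fun (acc : List Bool × Int) k =>
      if mask.getD k false then (acc.1 ++ [true], (k : Int))
      else
        let b := nt.getD k n
        (acc.1 ++ [decide (0 ≤ acc.2 ∧ b < n ∧ (b : Int) - acc.2 - 1 ≤ max_gap)], acc.2))
    ([], -1)).1

-- ===== PRECONDITION & SPEC =====
def Spec_fill_short_gaps_py (mask : List Bool) (max_gap : Int) (out : List Bool) : Prop := out = fill_short_gaps_py_alt mask max_gap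
instance (mask : List Bool) (max_gap : Int) (out : List Bool) : Decidable (Spec_fill_short_gaps_py mask max_gap out) := by unfold Spec_fill_short_gaps_py; infer_instance

-- ===== CLAIM (what is proved, stated in full; the proofs are below) =====
def Claim_equal_fill_short_gaps_py : Prop := ∀ (mask : List Bool) (max_gap : Int), Dom_fill_short_gaps_py mask max_gap → Spec_fill_short_gaps_py mask max_gap (fill_short_gaps_py mask max_gap)

-- ===== LEMMAS AND PROOFS =====

-- start of the silent run containing index k (k itself if mask[k] is true or k = 0)
def gapStart (mask : List Bool) : Nat → Nat
  | 0 => 0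
  | k + 1 => if mask.getD k false then k + 1 else gapStart mask k

-- the common model both ports are proved equal to
def specB (mask : List Bool) (max_gap : Int) (k : Nat) : Bool :=
  if mask.getD k false then true
  else decide (0 < gapStart mask k ∧ aGapEnd mask mask.length k < mask.length ∧
    ((aGapEnd mask mask.length k : Int) - (gapStart mask k : Int) ≤ max_gap))

def modelList (mask : List Bool) (max_gap : Int) : List Bool :=
  (List.range mask.length).map (specB mask max_gap)


theorem aGapEnd_pos (r : List Bool) (n i : Nat) (h : i < n ∧ r.getD i false = false) :
    aGapEnd r n i = aGapEnd r n (i + 1) := by rw [aGapEnd, dif_pos h]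

theorem aGapEnd_neg (r : List Bool) (n i : Nat) (h : ¬(i < n ∧ r.getD i false = false)) :
    aGapEnd r n i = i := by rw [aGapEnd, dif_neg h]

theorem aGapEnd_ge (r : List Bool) (n i : Nat) : i ≤ aGapEnd r n i := by
  by_cases h : i < n ∧ r.getD i false = false
  · rw [aGapEnd_pos r n i h]; exact le_trans (by omega) (aGapEnd_ge r n (i+1))
  · rw [aGapEnd_neg r n i h]
termination_by n - i
decreasing_by omega

theorem aGapEnd_le (r : List Bool) (n i : Nat) (h : i ≤ n) : aGapEnd r n i ≤ n := by
  by_cases hc : i < n ∧ r.getD i false = false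
  · rw [aGapEnd_pos r n i hc]; exact aGapEnd_le r n (i+1) (by omega)
  · rw [aGapEnd_neg r n i hc]; exact h
termination_by n - i
decreasing_by omega

theorem aGapEnd_stop (r : List Bool) (n i : Nat) (h : aGapEnd r n i < n) :
    r.getD (aGapEnd r n i) false = true := by
  by_cases hc : i < n ∧ r.getD i false = false
  · rw [aGapEnd_pos r n i hc] at h ⊢; exact aGapEnd_stop r n (i+1) h
  · rw [aGapEnd_neg r n i hc] at h ⊢
    cases hb : r.getD i false with
    | false => exact absurd ⟨h, hb⟩ hc
    | true => rfl
termination_by n - i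
decreasing_by omega

theorem aGapEnd_false (r : List Bool) (n i k : Nat) (h1 : i ≤ k) (h2 : k < aGapEnd r n i) :
    r.getD k false = false := by
  by_cases hc : i < n ∧ r.getD i false = false
  · rcases Nat.eq_or_lt_of_le h1 with rfl | hlt
    · exact hc.2
    · rw [aGapEnd_pos r n i hc] at h2
      exact aGapEnd_false r n (i+1) k (by omega) h2
  · rw [aGapEnd_neg r n i hc] at h2; omega
termination_by n - i
decreasing_by omega

theorem aGapEnd_congr (r s : List Bool) (n i : Nat)
    (h : ∀ k, i ≤ k → r.getD k false = s.getD k false) :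
    aGapEnd r n i = aGapEnd s n i := by
  by_cases hc : i < n ∧ s.getD i false = false
  · rw [aGapEnd_pos r n i ⟨hc.1, (h i le_rfl).trans hc.2⟩, aGapEnd_pos s n i hc]
    exact aGapEnd_congr r s n (i+1) (fun k hk => h k (by omega))
  · rw [aGapEnd_neg r n i (by rw [h i le_rfl]; exact hc), aGapEnd_neg s n i hc]
termination_by n - i
decreasing_by omega

theorem aGapEnd_run (r : List Bool) (n i k : Nat) (h1 : i ≤ k) (h2 : k ≤ aGapEnd r n i) :
    aGapEnd r n k = aGapEnd r n i := by
  rcases Nat.eq_or_lt_of_le h1 with rfl | hlt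
  · rfl
  · by_cases hc : i < n ∧ r.getD i false = false
    · rw [aGapEnd_pos r n i hc] at h2 ⊢
      exact aGapEnd_run r n (i+1) k (by omega) h2
    · rw [aGapEnd_neg r n i hc] at h2; omega
termination_by n - i
decreasing_by omega

theorem aGapEnd_gt (r : List Bool) (n i : Nat) (h1 : i < n) (h2 : r.getD i false = false) :
    i + 1 ≤ aGapEnd r n i := by
  rw [aGapEnd_pos r n i ⟨h1, h2⟩]; exact aGapEnd_ge r n (i+1)

theorem gapStart_succ_pos (m : List Bool) (k : Nat) (h : m.getD k false = true) :
    gapStart m (k + 1) = k + 1 := by rw [gapStart, if_pos h]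

theorem gapStart_succ_neg (m : List Bool) (k : Nat) (h : m.getD k false = false) :
    gapStart m (k + 1) = gapStart m k := by
  rw [gapStart, if_neg (by rw [h]; exact Bool.false_ne_true)]

theorem gapStart_run (m : List Bool) (i k : Nat) (h1 : i ≤ k)
    (h2 : ∀ j, i ≤ j → j < k → m.getD j false = false) : gapStart m k = gapStart m i := by
  induction k with
  | zero => rw [Nat.le_zero.mp h1]
  | succ k ih =>
    rcases Nat.eq_or_lt_of_le h1 with rfl | hlt
    · rfl
    · rw [gapStart_succ_neg m k (h2 k (by omega) (by omega))]
      exact ih (by omega) (fun j hj1 hj2 => h2 j hj1 (by omega))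

theorem aFill_nil (r : List Bool) (s j : Nat) (h : j ≤ s) : aFill r s j = r := by
  unfold aFill; rw [Nat.sub_eq_zero_of_le h]; rfl

theorem aFill_step (r : List Bool) (s j : Nat) (h : s < j) :
    aFill r s j = aFill (r.set s true) (s + 1) j := by
  unfold aFill
  rw [show j - s = (j - (s + 1)) + 1 by omega, List.range'_succ]
  rfl

theorem aFill_length (r : List Bool) (s j : Nat) : (aFill r s j).length = r.length := by
  by_cases h : s < j
  · rw [aFill_step r s j h, aFill_length (r.set s true) (s+1) j]; simp
  · rw [aFill_nil r s j (by omega)]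
termination_by j - s

theorem aFill_getD (r : List Bool) (s j k : Nat) (hj : j ≤ r.length) :
    (aFill r s j).getD k false = if s ≤ k ∧ k < j then true else r.getD k false := by
  by_cases h : s < j
  · rw [aFill_step r s j h, aFill_getD (r.set s true) (s+1) j k (by simpa using hj)]
    by_cases hk : k = s
    · subst hk
      rw [if_neg (by omega), if_pos ⟨le_rfl, h⟩]
      rw [List.getD_eq_getElem?_getD, List.getElem?_set, if_pos rfl, if_pos (by omega)]
      rfl
    · by_cases hk2 : s ≤ k ∧ k < j
      · rw [if_pos (by omega), if_pos hk2]
      · rw [if_neg (by omega), if_neg hk2]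
        rw [List.getD_eq_getElem?_getD, List.getElem?_set, if_neg (fun h' => hk h'.symm),
          ← List.getD_eq_getElem?_getD]
  · rw [aFill_nil r s j (by omega), if_neg (by omega)]
termination_by j - s

theorem result_eq_model (mask : List Bool) (max_gap : Int) (result : List Bool)
    (hl : result.length = mask.length)
    (h : ∀ k, k < mask.length → result.getD k false = specB mask max_gap k) :
    result = modelList mask max_gap := by
  apply List.ext_getElem (by simp [modelList, hl])
  intro k hk1 hk2
  have hk : k < mask.length := by omega
  have hgd := h k hk
  rw [List.getD_eq_getElem result false hk1] at hgd
  rw [hgd]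
  simp [modelList]

theorem aLoop_model (mask : List Bool) (max_gap : Int) :
    ∀ fuel i result, result.length = mask.length → mask.length - i ≤ fuel → i ≤ mask.length →
    (∀ k, i ≤ k → result.getD k false = mask.getD k false) →
    (∀ k, k < i → result.getD k false = specB mask max_gap k) →
    (i < mask.length → mask.getD i false = false → gapStart mask i = i) →
    aLoop max_gap result mask.length i fuel = modelList mask max_gap := by
  intro fuel
  induction fuel with
  | zero =>
    intro i result hl hfuel hi inv1 inv2 inv3
    have hi' : i = mask.length := by omega
    subst hi'
    exact result_eq_model mask max_gap result hl (fun k hk => inv2 k (by omega))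
  | succ fuel ih =>
    intro i result hl hfuel hi inv1 inv2 inv3
    rw [aLoop]
    by_cases hin : i < mask.length
    · rw [if_pos hin]
      by_cases hri : result.getD i false = false
      · rw [if_pos hri]
        have hmi : mask.getD i false = false := by rw [← inv1 i le_rfl]; exact hri
        have hje : aGapEnd result mask.length i = aGapEnd mask mask.length i :=
          aGapEnd_congr result mask mask.length i (fun k hk => inv1 k hk)
        set jm := aGapEnd mask mask.length i with hjm
        have hjgt : i + 1 ≤ jm := aGapEnd_gt mask mask.length i hin hmi
        have hjle : jm ≤ mask.length := aGapEnd_le mask mask.length i (by omega)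
        have hgsi : gapStart mask i = i := inv3 hin hmi
        -- facts about the run [i, jm)
        have hrun_false : ∀ k, i ≤ k → k < jm → mask.getD k false = false :=
          fun k h1 h2 => aGapEnd_false mask mask.length i k h1 h2
        have hrun_gs : ∀ k, i ≤ k → k < jm → gapStart mask k = i := by
          intro k h1 h2
          rw [gapStart_run mask i k h1 (fun j hj1 hj2 => hrun_false j hj1 (by omega)), hgsi]
        have hrun_ge : ∀ k, i ≤ k → k < jm → aGapEnd mask mask.length k = jm := by
          intro k h1 h2
          rw [aGapEnd_run mask mask.length i k h1 (by omega)]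
        have hspec : ∀ k, i ≤ k → k < jm →
            specB mask max_gap k =
              decide ((jm : Int) - (i : Int) ≤ max_gap ∧ 0 < i ∧ jm < mask.length) := by
          intro k h1 h2
          rw [specB, if_neg (by rw [hrun_false k h1 h2]; exact Bool.false_ne_true),
            hrun_gs k h1 h2, hrun_ge k h1 h2]
          apply decide_eq_decide.mpr
          constructor
          · intro h; exact ⟨h.2.2, h.1, h.2.1⟩
          · intro h; exact ⟨h.2.1, h.2.2, h.1⟩
        rw [hje]
        -- the updated result satisfies the invariants at jm
        set c := ((jm : Int) - (i : Int) ≤ max_gap ∧ 0 < i ∧ jm < mask.length) with hc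
        have key : ∀ result', (result' = if c then aFill result i jm else result) →
            aLoop max_gap result' mask.length jm fuel = modelList mask max_gap := by
          intro result' hres
          have hgd : ∀ k, result'.getD k false =
              if i ≤ k ∧ k < jm then decide c else result.getD k false := by
            intro k
            by_cases hcc : c
            · rw [hres, if_pos hcc, aFill_getD result i jm k (by omega)]
              by_cases hk : i ≤ k ∧ k < jm
              · rw [if_pos hk, if_pos hk]; simp [hcc]
              · rw [if_neg hk, if_neg hk]
            · rw [hres, if_neg hcc]
              by_cases hk : i ≤ k ∧ k < jm
              · rw [if_pos hk]
                simp only [decide_eq_false hcc]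
                rw [inv1 k hk.1, hrun_false k hk.1 hk.2]
              · rw [if_neg hk]
          have hl' : result'.length = mask.length := by
            by_cases hcc : c
            · rw [hres, if_pos hcc, aFill_length]; exact hl
            · rw [hres, if_neg hcc]; exact hl
          apply ih jm result' hl' (by omega) (by omega)
          · intro k hk
            rw [hgd k, if_neg (by omega)]
            exact inv1 k (by omega)
          · intro k hk
            by_cases hki : k < i
            · rw [hgd k, if_neg (by omega)]
              exact inv2 k hki
            · rw [hgd k, if_pos (by omega), hspec k (by omega) hk]
          · intro hjn hmj
            rw [aGapEnd_stop mask mask.length i hjn] at hmj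
            exact absurd hmj (by simp)
        exact key _ rfl
      · rw [if_neg hri]
        have hmi : mask.getD i false = true := by
          rw [← inv1 i le_rfl]; cases h : result.getD i false
          · exact absurd h hri
          · rfl
        apply ih (i+1) result hl (by omega) (by omega) (fun k hk => inv1 k (by omega))
        · intro k hk
          rcases Nat.lt_succ_iff_lt_or_eq.mp hk with h | rfl
          · exact inv2 k h
          · rw [inv1 k le_rfl, specB, if_pos hmi]; exact hmi
        · intro _ _
          exact gapStart_succ_pos mask i hmi
    · rw [if_neg hin]
      have hi' : i = mask.length := by omega
      subst hi'
      exact result_eq_model mask max_gap result hl (fun k hk => inv2 k (by omega))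

theorem fill_eq_model (mask : List Bool) (max_gap : Int) :
    fill_short_gaps_py mask max_gap = modelList mask max_gap := by
  unfold fill_short_gaps_py
  apply aLoop_model mask max_gap mask.length 0 mask rfl (by omega) (by omega)
    (fun k _ => rfl) (fun k hk => absurd hk (by omega))
  intro _ _; rfl

theorem bpass_aux (mask : List Bool) (N : Nat) :
    ∀ m, m ≤ N → ∀ (nt : List Nat) (nxt : Nat), nt.length = N → nxt = aGapEnd mask N m →
    (∀ k, m ≤ k → k < N → nt.getD k N = aGapEnd mask N k) →
    (((List.range m).reverse.foldl
        (fun (acc : List Nat × Nat) k =>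
          let nxt := if mask.getD k false then k else acc.2
          (acc.1.set k nxt, nxt)) (nt, nxt)).1.length = N ∧
      ∀ k, k < N →
        (((List.range m).reverse.foldl
          (fun (acc : List Nat × Nat) k =>
            let nxt := if mask.getD k false then k else acc.2
            (acc.1.set k nxt, nxt)) (nt, nxt)).1.getD k N = aGapEnd mask N k)) := by
  intro m
  induction m with
  | zero =>
    intro _ nt nxt hlen _ hnt
    exact ⟨hlen, fun k hk => hnt k (Nat.zero_le k) hk⟩
  | succ m ih =>
    intro hm nt nxt hlen hnxt hnt
    rw [List.range_succ, List.reverse_append, List.reverse_singleton, List.singleton_append,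
      List.foldl_cons]
    have hmN : m < N := by omega
    have hnxt' : (if mask.getD m false then m else nxt) = aGapEnd mask N m := by
      cases hb : mask.getD m false with
      | false =>
        rw [if_neg (by simp), hnxt, aGapEnd_pos mask N m ⟨hmN, hb⟩]
      | true =>
        rw [if_pos rfl, aGapEnd_neg mask N m (by rw [hb]; simp)]
    apply ih (by omega) (nt.set m (if mask.getD m false then m else nxt)) _ (by simp [hlen])
      hnxt'
    intro k hk1 hk2
    rcases Nat.eq_or_lt_of_le hk1 with rfl | hlt
    · rw [List.getD_eq_getElem?_getD, List.getElem?_set, if_pos rfl, if_pos (by omega), hnxt']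
      rfl
    · rw [List.getD_eq_getElem?_getD, List.getElem?_set, if_neg (by omega),
        ← List.getD_eq_getElem?_getD]
      exact hnt k (by omega) hk2

theorem bNextPass_getD (mask : List Bool) (n : Nat) (k : Nat) (hk : k < n) :
    (bNextPass mask n).getD k n = aGapEnd mask n k := by
  have h := bpass_aux mask n n le_rfl (List.replicate n n) n (by simp)
    (by rw [aGapEnd_neg mask n n (by omega)]) (fun k hk1 hk2 => absurd hk1 (by omega))
  exact h.2 k hk

theorem bfwd (mask : List Bool) (max_gap : Int) (nt : List Nat)
    (hnt : ∀ k, k < mask.length → nt.getD k mask.length = aGapEnd mask mask.length k) :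
    ∀ m, m ≤ mask.length →
    ((List.range m).foldl
      (fun (acc : List Bool × Int) k =>
        if mask.getD k false then (acc.1 ++ [true], (k : Int))
        else
          let b := nt.getD k mask.length
          (acc.1 ++ [decide (0 ≤ acc.2 ∧ b < mask.length ∧ (b : Int) - acc.2 - 1 ≤ max_gap)],
            acc.2)) ([], -1)) =
      ((List.range m).map (specB mask max_gap), (gapStart mask m : Int) - 1) := by
  intro m
  induction m with
  | zero => intro _; simp [gapStart]
  | succ m ih =>
    intro hm
    have hmn : m < mask.length := by omega
    rw [List.range_succ, List.foldl_append, List.foldl_cons, List.foldl_nil, ih (by omega),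
      List.map_append, List.map_cons, List.map_nil]
    cases hb : mask.getD m false with
    | true =>
      have hspec : specB mask max_gap m = true := by rw [specB, if_pos hb]
      rw [gapStart_succ_pos mask m hb, hspec]
      simp
    | false =>
      have hspec : specB mask max_gap m =
          decide (0 ≤ (gapStart mask m : Int) - 1 ∧ nt.getD m mask.length < mask.length ∧
            ((nt.getD m mask.length : Int)) - ((gapStart mask m : Int) - 1) - 1 ≤ max_gap) := by
        rw [specB, if_neg (by rw [hb]; simp), hnt m hmn]
        apply decide_eq_decide.mpr
        constructor
        · intro h; refine ⟨by omega, h.2.1, by omega⟩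
        · intro h; refine ⟨by omega, h.2.1, by omega⟩
      rw [gapStart_succ_neg mask m hb, hspec]
      simp

theorem alt_eq_model (mask : List Bool) (max_gap : Int) :
    fill_short_gaps_py_alt mask max_gap = modelList mask max_gap := by
  unfold fill_short_gaps_py_alt modelList
  dsimp only
  rw [bfwd mask max_gap (bNextPass mask mask.length)
    (fun k hk => bNextPass_getD mask mask.length k hk) mask.length le_rfl]

-- ===== VERDICT (by name: the statement is the Claim_ definition above) =====
theorem fill_short_gaps_py_spec : Claim_equal_fill_short_gaps_py := by
  intro mask max_gap _
  unfold Spec_fill_short_gaps_py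
  rw [fill_eq_model, alt_eq_model]
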